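-- pv_equiv track=rewrite | github.com/SuperScript-PRC/FamiStudioTools | DPCMTool/long_dpcm_importer/create_file_from_dpcmdata_files.py | generate_all_pat_data
-- ===== SOURCE A (Python) =====
-- def generate_all_pat_data(used_notes: list[tuple[str, str]]):
--     DURATION = 30
--     pattern_time_sum = 0
--     pattern_counter = 1
--     output = '			Pattern Name="Pattern 1" Color="d863ec"'
--     output2 = '			PatternInstance Time="0" Pattern="Pattern 1"'
--     for ins, n in used_notes:
--         output += f'\n				Note Time="{pattern_time_sum}" Value="{n}" Duration="{DURATION}" Instrument="{ins}"'
--         pattern_time_sum += DURATION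
--         if pattern_time_sum >= 160:
--             pattern_time_sum -= 160
--             pattern_counter += 1
--             output += f'\n			Pattern Name="Pattern {pattern_counter}" Color="d863ec"'
--             output2 += f'\n			PatternInstance Time="{pattern_counter-1}" Pattern="Pattern {pattern_counter}"'
--     return output + "\n" + output2
-- ===== SOURCE B (Python) =====
-- def generate_all_pat_data(used_notes: list[tuple[str, str]]):
--     # Recursive, pattern-at-a-time decomposition: each call slices off one whole
--     # pattern's worth of notes (up to the next boundary b = ceil(160*(k+1)/30)),
--     # emits its note lines in one join, and recurses on the remaining notes.
--     def chunk(notes, i, k):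
--         # notes = the remaining notes, i = absolute index of notes[0], k = current
--         # pattern number - 1; the current pattern ends before absolute index b.
--         b = (160 * (k + 1) + 29) // 30
--         head = notes[: b - i]
--         tail = notes[b - i:]
--         body = ''.join(
--             f'\n\t\t\t\tNote Time="{30 * j - 160 * k}" Value="{v}" Duration="30" Instrument="{ins}"'
--             for j, (ins, v) in enumerate(head, i))
--         if i + len(head) == b:  # this pattern was completed: open the next one
--             body += f'\n\t\t\tPattern Name="Pattern {k + 2}" Color="d863ec"'
--             s2 = f'\n\t\t\tPatternInstance Time="{k + 1}" Pattern="Pattern {k + 2}"'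
--             rest, rest2 = chunk(tail, b, k + 1) if tail else ('', '')
--             return body + rest, s2 + rest2
--         return body, ''
--
--     out = '\t\t\tPattern Name="Pattern 1" Color="d863ec"'
--     out2 = '\t\t\tPatternInstance Time="0" Pattern="Pattern 1"'
--     more, more2 = chunk(used_notes, 0, 0) if used_notes else ('', '')
--     return out + more + "\n" + out2 + more2
-- ===== Notes on version B (the rewrite author's own statement) =====
-- stated objective: alternative
-- what changed: B replaces A's note-by-note loop with mutable pattern_time_sum/pattern_counter state by a recursion over whole patterns: it computes the next boundary ceil(160*(k+1)/30) in closed form, slices off one pattern's notes at a time, joins their lines in one pass, and recurses on the remainder.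
import Mathlib
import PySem

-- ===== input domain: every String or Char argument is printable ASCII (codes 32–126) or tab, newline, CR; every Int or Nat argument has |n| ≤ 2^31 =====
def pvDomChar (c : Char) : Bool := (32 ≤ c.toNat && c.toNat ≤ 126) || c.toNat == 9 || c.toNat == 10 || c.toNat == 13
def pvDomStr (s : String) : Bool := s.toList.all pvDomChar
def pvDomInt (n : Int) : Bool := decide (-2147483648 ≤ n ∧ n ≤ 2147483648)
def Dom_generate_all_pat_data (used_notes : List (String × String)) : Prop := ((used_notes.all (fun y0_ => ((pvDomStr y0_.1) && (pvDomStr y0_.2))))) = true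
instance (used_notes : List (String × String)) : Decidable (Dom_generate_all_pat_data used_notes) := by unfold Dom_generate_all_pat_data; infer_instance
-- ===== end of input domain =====

-- B replaces A's note-by-note loop with mutable wrap-around state by a recursion over whole
-- patterns: closed-form boundary, slice one pattern's notes, join their lines, recurse
-- (objective: alternative; same O(n) cost).

-- ===== PORT A =====
-- A's for-loop: state (pattern_time_sum, pattern_counter, output, output2)
def generate_all_pat_data_loop (psum counter : Int) (out out2 : String) :
    List (String × String) → String × String
  | [] => (out, out2)
  | (ins, n) :: rest =>
    let out := out ++ "\n\t\t\t\tNote Time=\"" ++ PySem.Int.toStr psum ++ "\" Value=\"" ++ n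
               ++ "\" Duration=\"30\" Instrument=\"" ++ ins ++ "\""
    let psum := psum + 30
    if psum ≥ 160 then
      let psum := psum - 160
      let counter := counter + 1
      generate_all_pat_data_loop psum counter
        (out ++ "\n\t\t\tPattern Name=\"Pattern " ++ PySem.Int.toStr counter ++ "\" Color=\"d863ec\"")
        (out2 ++ "\n\t\t\tPatternInstance Time=\"" ++ PySem.Int.toStr (counter - 1)
              ++ "\" Pattern=\"Pattern " ++ PySem.Int.toStr counter ++ "\"")
        rest
    else
      generate_all_pat_data_loop psum counter out out2 rest

def generate_all_pat_data (used_notes : List (String × String)) : String :=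
  let r := generate_all_pat_data_loop 0 1
    "\t\t\tPattern Name=\"Pattern 1\" Color=\"d863ec\""
    "\t\t\tPatternInstance Time=\"0\" Pattern=\"Pattern 1\""
    used_notes
  r.1 ++ "\n" ++ r.2

-- ===== PORT B =====
-- Source B's ''.join(... for j,(ins,v) in enumerate(head, i)) building one pattern's note lines
def pvBody (head : List (String × String)) (i k : Int) : String :=
  PySem.Str.join "" ((PySem.List.enumerate head i).map (fun p =>
    "\n\t\t\t\tNote Time=\"" ++ PySem.Int.toStr (30 * p.1 - 160 * k) ++ "\" Value=\"" ++ p.2.2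
      ++ "\" Duration=\"30\" Instrument=\"" ++ p.2.1 ++ "\""))

-- Source B's recursive chunk(notes, i, k); fuel = used_notes.length bounds the recursion depth
-- (each reachable call slices off at least one note), otherwise step for step
def pvChunk : Nat → List (String × String) → Int → Int → String × String
  | 0, _, _, _ => ("", "")
  | fuel+1, notes, i, k =>
    let b : Int := PySem.Int.floordiv (160 * (k + 1) + 29) 30
    let head := PySem.List.slice notes none (some (b - i))
    let tail := PySem.List.slice notes (some (b - i)) none
    let body := pvBody head i k
    if i + (head.length : Int) = b then
      let body := body ++ "\n\t\t\tPattern Name=\"Pattern " ++ PySem.Int.toStr (k + 2) ++ "\" Color=\"d863ec\""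
      let s2 := "\n\t\t\tPatternInstance Time=\"" ++ PySem.Int.toStr (k + 1)
                ++ "\" Pattern=\"Pattern " ++ PySem.Int.toStr (k + 2) ++ "\""
      let r := if tail.isEmpty then ("", "") else pvChunk fuel tail b (k + 1)
      (body ++ r.1, s2 ++ r.2)
    else (body, "")

def generate_all_pat_data_alt (used_notes : List (String × String)) : String :=
  let out := "\t\t\tPattern Name=\"Pattern 1\" Color=\"d863ec\""
  let out2 := "\t\t\tPatternInstance Time=\"0\" Pattern=\"Pattern 1\""
  let m := if used_notes.isEmpty then (("", "") : String × String)
           else pvChunk used_notes.length used_notes 0 0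
  out ++ m.1 ++ "\n" ++ out2 ++ m.2

-- ===== PRECONDITION & SPEC =====
def Spec_generate_all_pat_data (used_notes : List (String × String)) (out : String) : Prop := out = generate_all_pat_data_alt used_notes
instance (used_notes : List (String × String)) (out : String) : Decidable (Spec_generate_all_pat_data used_notes out) := by unfold Spec_generate_all_pat_data; infer_instance

-- ===== CLAIM (what is proved, stated in full; the proofs are below) =====
def Claim_equal_generate_all_pat_data : Prop := ∀ (used_notes : List (String × String)), Dom_generate_all_pat_data used_notes → Spec_generate_all_pat_data used_notes (generate_all_pat_data used_notes)

-- ===== LEMMAS AND PROOFS =====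

lemma join_empty_cons (a : String) (l : List String) :
    PySem.Str.join "" (a :: l) = a ++ PySem.Str.join "" l := by
  cases l with
  | nil => simp [PySem.Str.join]
  | cons b t => simp only [PySem.Str.join, List.map, PySem.Chars.join_cons_cons]; simp

lemma pvBody_nil (i k : Int) : pvBody [] i k = "" := by
  simp [pvBody, PySem.Str.join]

lemma pvBody_cons (x : String × String) (hd : List (String × String)) (i k : Int) :
    pvBody (x :: hd) i k =
      ("\n\t\t\t\tNote Time=\"" ++ PySem.Int.toStr (30 * i - 160 * k) ++ "\" Value=\"" ++ x.2
        ++ "\" Duration=\"30\" Instrument=\"" ++ x.1 ++ "\"") ++ pvBody hd (i + 1) k := by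
  simp only [pvBody, PySem.List.enumerate_cons, List.map_cons, join_empty_cons]

lemma pvBody_append (l1 l2 : List (String × String)) (i k : Int) :
    pvBody (l1 ++ l2) i k = pvBody l1 i k ++ pvBody l2 (i + l1.length) k := by
  induction l1 generalizing i with
  | nil => simp [pvBody_nil]
  | cons x t ih =>
    simp only [List.cons_append, pvBody_cons, ih, List.length_cons]
    push_cast
    have e : i + ((t.length : Int) + 1) = i + 1 + (t.length : Int) := by ring
    rw [e]
    simp [String.append_assoc]

-- a run of notes that never reaches the pattern boundary
lemma run_eq (hd : List (String × String)) : ∀ (i k : Int) (out out2 : String)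
    (rest : List (String × String)),
    160 * k ≤ 30 * i → 30 * (i + hd.length) < 160 * (k + 1) →
    generate_all_pat_data_loop (30 * i - 160 * k) (k + 1) out out2 (hd ++ rest)
      = generate_all_pat_data_loop (30 * (i + hd.length) - 160 * k) (k + 1)
          (out ++ pvBody hd i k) out2 rest := by
  induction hd with
  | nil => intro i k out out2 rest _ _; simp [pvBody_nil]
  | cons x t ih =>
    intro i k out out2 rest hlo hhi
    obtain ⟨ins, n⟩ := x
    simp only [List.cons_append, generate_all_pat_data_loop]
    have hc : ¬ (30 * i - 160 * k + 30 ≥ 160) := by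
      simp only [List.length_cons] at hhi
      push_cast at hhi
      omega
    rw [if_neg hc]
    have harg : 30 * i - 160 * k + 30 = 30 * (i + 1) - 160 * k := by ring
    rw [harg]
    have h2 := ih (i + 1) k
      (out ++ "\n\t\t\t\tNote Time=\"" ++ PySem.Int.toStr (30 * i - 160 * k) ++ "\" Value=\"" ++ n
        ++ "\" Duration=\"30\" Instrument=\"" ++ ins ++ "\"") out2 rest
      (by omega)
      (by simp only [List.length_cons] at hhi ⊢; push_cast at hhi ⊢; omega)
    rw [h2]
    simp only [pvBody_cons, List.length_cons]
    push_cast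
    have e : i + ((t.length : Int) + 1) = i + 1 + (t.length : Int) := by ring
    rw [e]
    simp [String.append_assoc]

-- main invariant: A's loop from state (30*i-160*k, k+1) equals B's chunk recursion
lemma chunk_eq : ∀ (fuel : Nat) (notes : List (String × String)) (i k : Int)
    (out out2 : String),
    notes.length ≤ fuel → 0 ≤ k → 160 * k ≤ 30 * i → 30 * i < 160 * (k + 1) →
    generate_all_pat_data_loop (30 * i - 160 * k) (k + 1) out out2 notes
      = (out ++ (pvChunk fuel notes i k).1, out2 ++ (pvChunk fuel notes i k).2) := by
  intro fuel
  induction fuel with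
  | zero =>
    intro notes i k out out2 hlen _ _ _
    have hnil : notes = [] := List.eq_nil_of_length_eq_zero (by omega)
    subst hnil
    simp [pvChunk, generate_all_pat_data_loop]
  | succ fuel ih =>
    intro notes i k out out2 hlen hk hlo hhi
    have hfd : PySem.Int.floordiv (160 * (k + 1) + 29) 30 = (160 * (k + 1) + 29) / 30 :=
      PySem.Int.floordiv_eq_ediv_of_pos (by omega)
    simp only [pvChunk, hfd]
    set b0 : Int := (160 * (k + 1) + 29) / 30 with hb0
    have hb1 : 160 * (k + 1) ≤ 30 * b0 := by omega
    have hb2 : 30 * (b0 - 1) < 160 * (k + 1) := by omega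
    have hib : i < b0 := by omega
    have hbi0 : (0 : Int) ≤ b0 - i := by omega
    have hcastm : ((b0 - i).toNat : Int) = b0 - i := Int.toNat_of_nonneg hbi0
    rw [PySem.List.slice_to _ hbi0, PySem.List.slice_from _ hbi0]
    set m : Nat := (b0 - i).toNat with hm
    have hm1 : 1 ≤ m := by omega
    by_cases hsmall : notes.length < m
    · -- incomplete final pattern: head = notes, tail = [], no boundary is reached
      have htake : notes.take m = notes := List.take_of_length_le (by omega)
      have hdrop : notes.drop m = [] := List.drop_eq_nil_of_le (by omega)
      rw [htake, hdrop]
      have hcond : ¬ (i + (notes.length : Int) = b0) := by omega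
      rw [if_neg hcond]
      have h2 := run_eq notes i k out out2 [] hlo (by omega)
      simp only [List.append_nil] at h2
      rw [h2]
      simp [generate_all_pat_data_loop]
    · -- the pattern completes exactly at absolute index b0 - 1
      have hmlen : m ≤ notes.length := by omega
      have hlt : m - 1 < notes.length := by omega
      have hlen_take : (notes.take m).length = m := by
        simp [List.length_take]; omega
      have hcond : i + ((notes.take m).length : Int) = b0 := by rw [hlen_take]; omega
      rw [if_pos hcond]
      have hlen_take1 : (notes.take (m - 1)).length = m - 1 := by
        simp [List.length_take]; omega
      have hsplit : notes = notes.take (m - 1) ++ (notes[m-1]'hlt :: notes.drop m) := by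
        conv_lhs => rw [← List.take_append_drop (m - 1) notes]
        congr 1
        rw [List.drop_eq_getElem_cons hlt]
        congr 2
        omega
      have htakem : notes.take m = notes.take (m - 1) ++ [notes[m-1]'hlt] := by
        have e : m = (m - 1) + 1 := by omega
        conv_lhs => rw [e, List.take_add_one]
        rw [List.getElem?_eq_getElem hlt]
        rfl
      have hrun := run_eq (notes.take (m - 1)) i k out out2 (notes[m-1]'hlt :: notes.drop m)
        hlo (by rw [hlen_take1]; omega)
      rw [hlen_take1] at hrun
      have hidx : 30 * (i + ((m - 1 : Nat) : Int)) - 160 * k = 30 * (b0 - 1) - 160 * k := by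
        omega
      rw [hidx] at hrun
      conv_lhs => rw [hsplit]
      rw [hrun]
      -- the boundary note itself
      rw [htakem, pvBody_append, hlen_take1]
      generalize hp : notes[m-1]'hlt = p
      obtain ⟨ins, n⟩ := p
      simp only [generate_all_pat_data_loop, pvBody_cons, pvBody_nil]
      have hcnd2 : 30 * (b0 - 1) - 160 * k + 30 ≥ 160 := by omega
      rw [if_pos hcnd2]
      have e1 : 30 * (b0 - 1) - 160 * k + 30 - 160 = 30 * b0 - 160 * (k + 1) := by ring
      have e2 : (k : Int) + 1 + 1 = k + 2 := by ring
      have e3 : (k : Int) + 2 - 1 = k + 1 := by ring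
      have e4 : 30 * (i + ((m - 1 : Nat) : Int)) - 160 * k = 30 * (b0 - 1) - 160 * k := by
        omega
      rw [e1, e2, e3, e4]
      cases hdm : notes.drop m with
      | nil =>
        simp only [generate_all_pat_data_loop, List.isEmpty_nil, if_pos]
        simp [String.append_assoc]
      | cons y ys =>
        have hlen2 : (y :: ys).length ≤ fuel := by
          have hld : (notes.drop m).length = notes.length - m := by simp
          rw [hdm] at hld
          simp only [List.length_cons] at hld ⊢
          omega
        have h3 := ih (y :: ys) b0 (k + 1)
          ((out ++ pvBody (notes.take (m - 1)) i k) ++ "\n\t\t\t\tNote Time=\""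
            ++ PySem.Int.toStr (30 * (b0 - 1) - 160 * k) ++ "\" Value=\"" ++ n
            ++ "\" Duration=\"30\" Instrument=\"" ++ ins ++ "\""
            ++ "\n\t\t\tPattern Name=\"Pattern " ++ PySem.Int.toStr (k + 2) ++ "\" Color=\"d863ec\"")
          (out2 ++ "\n\t\t\tPatternInstance Time=\"" ++ PySem.Int.toStr (k + 1)
              ++ "\" Pattern=\"Pattern " ++ PySem.Int.toStr (k + 2) ++ "\"")
          hlen2 (by omega) (by omega) (by omega)
        rw [e2] at h3
        rw [h3]
        simp [String.append_assoc]

-- ===== VERDICT (by name: the statement is the Claim_ definition above) =====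
theorem generate_all_pat_data_spec : Claim_equal_generate_all_pat_data := by
  intro used_notes _
  unfold Spec_generate_all_pat_data generate_all_pat_data generate_all_pat_data_alt
  cases used_notes with
  | nil => simp [generate_all_pat_data_loop]
  | cons x xs =>
    have h := chunk_eq (x :: xs).length (x :: xs) 0 0
      "\t\t\tPattern Name=\"Pattern 1\" Color=\"d863ec\""
      "\t\t\tPatternInstance Time=\"0\" Pattern=\"Pattern 1\""
      (le_refl _) (by norm_num) (by norm_num) (by norm_num)
    norm_num at h
    simp only [List.isEmpty_cons]
    rw [h]
    simp [← String.append_assoc]
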